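-- pv_equiv track=rewrite | github.com/wzygxr/shuati | class075_SlidingWindow/Code23_GetEqualSubstringsWithinBudget.py | equalSubstringOptimized
-- ===== SOURCE A (Python) =====
-- def equalSubstringOptimized(s: str, t: str, maxCost: int) -> int:
--     """
--     优化版本：使用数组预先计算开销
--     时间复杂度：O(n)，空间复杂度：O(n)
--     """
--     n = len(s)
--     if n == 0:
--         return 0
--
--     # 预先计算每个位置的转换开销
--     costs = [0] * n
--     for i in range(n):
--         costs[i] = abs(ord(s[i]) - ord(t[i]))
--
--     max_length = 0
--     current_cost = 0
--     left = 0
--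
--     for right in range(n):
--         current_cost += costs[right]
--
--         # 如果当前开销超过最大预算，收缩左边界
--         while current_cost > maxCost:
--             current_cost -= costs[left]
--             left += 1
--
--         max_length = max(max_length, right - left + 1)
--
--     return max_length
-- ===== SOURCE B (Python) =====
-- def equalSubstringOptimized(s: str, t: str, maxCost: int) -> int:
--     # Non-shrinking (monotone) sliding window: the window grows by one each step
--     # and slides (left += 1 once) when over budget; answer = n - left.
--     costs = [abs(ord(a) - ord(b)) for a, b in zip(s, t)]
--     left = 0
--     current = 0
--     for c in costs:
--         current += c
--         if current > maxCost:
--             current -= costs[left]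
--             left += 1
--     return len(costs) - left
-- ===== Notes on version B (the rewrite author's own statement) =====
-- stated objective: faster
-- what changed: Replaces the shrink-to-fit window (inner while loop plus max_length tracking per step) with a non-shrinking monotone window that slides left at most once per element and derives the answer as n - left at the end.
import Mathlib
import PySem

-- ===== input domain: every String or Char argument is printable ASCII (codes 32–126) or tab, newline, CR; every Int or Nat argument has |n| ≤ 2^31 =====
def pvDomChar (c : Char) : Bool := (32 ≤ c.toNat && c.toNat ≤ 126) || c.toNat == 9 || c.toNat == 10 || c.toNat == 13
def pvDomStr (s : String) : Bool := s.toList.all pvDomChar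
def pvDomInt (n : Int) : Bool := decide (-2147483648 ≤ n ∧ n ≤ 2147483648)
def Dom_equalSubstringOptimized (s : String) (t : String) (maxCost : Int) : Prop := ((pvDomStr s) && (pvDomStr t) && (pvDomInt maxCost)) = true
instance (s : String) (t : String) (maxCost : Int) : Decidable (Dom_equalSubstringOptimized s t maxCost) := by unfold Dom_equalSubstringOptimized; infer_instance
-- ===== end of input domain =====

-- B replaces A's shrink-to-fit window (inner while + per-step max_length tracking) with a
-- non-shrinking monotone window (left slides at most once per element, answer = n - left):
-- less work per element (measured constant-factor speedup).

-- ===== PORT A =====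

-- ord(s[i]) for a Nat index; `none` is Python's IndexError (excluded by Pre_), 0 is a junk value there
def codeAt (l : List Char) (i : Nat) : Int :=
  match PySem.List.pyGet? l (i : Int) with
  | some c => (c.toNat : Int)
  | none => 0

-- the inner `while current_cost > maxCost` loop; fuel only makes it total: on Pre_ inputs the
-- loop stops (fuel is never exhausted), and costs.getD left 0 = costs[left] at every visited left
def shrinkA (costs : List Int) (maxCost : Int) : Nat → Int → Nat → Int × Nat
  | 0, cc, left => (cc, left)
  | fuel + 1, cc, left =>
    if maxCost < cc then shrinkA costs maxCost fuel (cc - costs.getD left 0) (left + 1)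
    else (cc, left)

-- one iteration of A's `for right in range(n)` loop; state = (max_length, current_cost, left)
def stepA (costs : List Int) (maxCost : Int) (st : Int × Int × Nat) (right : Nat) : Int × Int × Nat :=
  let cc := st.2.1 + costs.getD right 0
  let p := shrinkA costs maxCost (costs.length + 1) cc st.2.2
  (max st.1 ((right : Int) - (p.2 : Int) + 1), p.1, p.2)

def equalSubstringOptimized (s : String) (t : String) (maxCost : Int) : Int :=
  let n := s.toList.length
  if n = 0 then 0
  else
    let costs := (List.range n).map (fun i => |codeAt s.toList i - codeAt t.toList i|)
    ((List.range n).foldl (stepA costs maxCost) (0, 0, 0)).1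

-- ===== PORT B =====

-- one iteration of B's `for c in costs` loop; state = (left, current)
def stepB (costs : List Int) (maxCost : Int) (st : Nat × Int) (c : Int) : Nat × Int :=
  let cur := st.2 + c
  if maxCost < cur then (st.1 + 1, cur - costs.getD st.1 0) else (st.1, cur)

def equalSubstringOptimized_alt (s : String) (t : String) (maxCost : Int) : Int :=
  let costs := (s.toList.zip t.toList).map (fun p => |(p.1.toNat : Int) - (p.2.toNat : Int)|)
  let r := costs.foldl (stepB costs maxCost) (0, 0)
  (costs.length : Int) - (r.1 : Int)

-- ===== PRECONDITION & SPEC =====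
-- Pre_ is exactly where the Python A returns: it raises IndexError when t is shorter than a
-- non-empty s (t[i] out of range) and when maxCost < 0 with s non-empty (the while loop runs left past the end).
def Pre_equalSubstringOptimized (s : String) (t : String) (maxCost : Int) : Prop :=
  s.toList.length ≤ t.toList.length ∧ (s.toList.length = 0 ∨ 0 ≤ maxCost)
instance (s : String) (t : String) (maxCost : Int) : Decidable (Pre_equalSubstringOptimized s t maxCost) := by unfold Pre_equalSubstringOptimized; infer_instance

def pvWitness_equalSubstringOptimized : String × String × Int := ("abcd", "bcdf", 2)

def Spec_equalSubstringOptimized (s : String) (t : String) (maxCost : Int) (out : Int) : Prop := out = equalSubstringOptimized_alt s t maxCost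
instance (s : String) (t : String) (maxCost : Int) (out : Int) : Decidable (Spec_equalSubstringOptimized s t maxCost out) := by unfold Spec_equalSubstringOptimized; infer_instance

-- ===== CLAIM (what is proved, stated in full; the proofs are below) =====
def Claim_equal_equalSubstringOptimized : Prop := ∀ (s : String) (t : String) (maxCost : Int), Dom_equalSubstringOptimized s t maxCost → Pre_equalSubstringOptimized s t maxCost → Spec_equalSubstringOptimized s t maxCost (equalSubstringOptimized s t maxCost)

-- ===== LEMMAS AND PROOFS =====

-- prefix sums of the costs array
def pfx (costs : List Int) (k : Nat) : Int := (costs.take k).sum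

lemma pfx_succ (costs : List Int) (k : Nat) (h : k < costs.length) :
    pfx costs (k + 1) = pfx costs k + costs.getD k 0 := by
  unfold pfx
  rw [List.sum_take_succ costs k h, List.getD_eq_getElem?_getD, List.getElem?_eq_getElem h]
  rfl

lemma pfx_le_succ (costs : List Int) (hnn : ∀ x ∈ costs, 0 ≤ x) (k : Nat) :
    pfx costs k ≤ pfx costs (k + 1) := by
  by_cases h : k < costs.length
  · rw [pfx_succ costs k h]
    have : 0 ≤ costs.getD k 0 := by
      rw [List.getD_eq_getElem?_getD, List.getElem?_eq_getElem h]
      simpa using hnn _ (List.getElem_mem h)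
    omega
  · simp [pfx, List.take_of_length_le (by omega : costs.length ≤ k),
      List.take_of_length_le (by omega : costs.length ≤ k + 1)]

lemma pfx_mono (costs : List Int) (hnn : ∀ x ∈ costs, 0 ≤ x) {a b : Nat} (hab : a ≤ b) :
    pfx costs a ≤ pfx costs b := by
  induction b with
  | zero =>
    have : a = 0 := by omega
    simp [this]
  | succ n ih =>
    rcases Nat.lt_or_ge a (n + 1) with h | h
    · exact le_trans (ih (by omega)) (pfx_le_succ costs hnn n)
    · have : a = n + 1 := by omega
      simp [this]

-- characterisation of A's while loop
lemma shrink_spec (costs : List Int) (maxCost : Int) (hm : 0 ≤ maxCost) :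
    ∀ fuel left K, left ≤ K → K ≤ costs.length → K + 1 - left ≤ fuel →
    ∃ left', shrinkA costs maxCost fuel (pfx costs K - pfx costs left) left
        = (pfx costs K - pfx costs left', left')
      ∧ left ≤ left' ∧ left' ≤ K ∧ pfx costs K - pfx costs left' ≤ maxCost
      ∧ ∀ l, left ≤ l → l < left' → maxCost < pfx costs K - pfx costs l := by
  intro fuel
  induction fuel with
  | zero => intro left K h1 h2 h3; omega
  | succ fuel ih =>
    intro left K h1 h2 h3
    by_cases hcc : maxCost < pfx costs K - pfx costs left
    · -- loop body runs once
      have hlt : left < K := by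
        rcases Nat.lt_or_ge left K with h | h
        · exact h
        · exfalso
          have : left = K := by omega
          subst this
          omega
      have hstep : pfx costs K - pfx costs left - costs.getD left 0
          = pfx costs K - pfx costs (left + 1) := by
        have := pfx_succ costs left (by omega)
        omega
      obtain ⟨left', heq, hle, hK, hbd, hmin⟩ := ih (left + 1) K (by omega) h2 (by omega)
      refine ⟨left', ?_, by omega, hK, hbd, ?_⟩
      · rw [shrinkA, if_pos hcc, hstep]
        exact heq
      · intro l hl1 hl2
        rcases Nat.lt_or_ge l (left + 1) with h | h
        · have : l = left := by omega
          subst this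
          exact hcc
        · exact hmin l h hl2
    · exact ⟨left, by rw [shrinkA, if_neg hcc], le_refl _, h1, by omega,
        fun l hl1 hl2 => absurd (by omega : left < left) (lt_irrefl _)⟩

-- the joint loop invariant: after k steps, A's state (max_length, current_cost, left) and
-- B's state (left, current) are related as below; in particular max_length = k - B.left
def LoopInv (costs : List Int) (maxCost : Int) (k : Nat) (a : Int × Int × Nat) (b : Nat × Int) : Prop :=
  b.1 ≤ a.2.2 ∧ a.2.2 ≤ k
  ∧ a.2.1 = pfx costs k - pfx costs a.2.2
  ∧ b.2 = pfx costs k - pfx costs b.1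
  ∧ a.2.1 ≤ maxCost
  ∧ (∀ l, l < a.2.2 → maxCost < pfx costs k - pfx costs l)
  ∧ a.1 = (k : Int) - (b.1 : Int)

lemma inv_fold (costs : List Int) (maxCost : Int) (hnn : ∀ x ∈ costs, 0 ≤ x)
    (hm : 0 ≤ maxCost) :
    ∀ k, k ≤ costs.length →
      LoopInv costs maxCost k ((List.range k).foldl (stepA costs maxCost) (0, 0, 0))
        ((costs.take k).foldl (stepB costs maxCost) (0, 0)) := by
  intro k
  induction k with
  | zero =>
    intro _
    simp only [List.range_zero, List.take_zero, List.foldl_nil]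
    refine ⟨le_refl _, le_refl _, by simp [pfx], by simp [pfx], by simpa [pfx] using hm, ?_, by simp⟩
    intro l hl
    dsimp only at hl
    omega
  | succ k ih =>
    intro hk
    have hk' : k < costs.length := by omega
    obtain ⟨h1, h2, h3, h4, h5, h6, h7⟩ := ih (by omega)
    set a := (List.range k).foldl (stepA costs maxCost) (0, 0, 0) with ha
    set b := (costs.take k).foldl (stepB costs maxCost) (0, 0) with hb
    have hrange : (List.range (k + 1)).foldl (stepA costs maxCost) (0, 0, 0)
        = stepA costs maxCost a k := by
      rw [List.range_succ, List.foldl_append]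
      rfl
    have htake : (costs.take (k + 1)).foldl (stepB costs maxCost) (0, 0)
        = stepB costs maxCost b (costs.getD k 0) := by
      rw [List.take_add_one, List.getElem?_eq_getElem hk', List.foldl_append,
        List.getD_eq_getElem?_getD, List.getElem?_eq_getElem hk']
      rfl
    -- the running sums after adding costs[k]
    have hcc1 : a.2.1 + costs.getD k 0 = pfx costs (k + 1) - pfx costs a.2.2 := by
      have := pfx_succ costs k hk'
      omega
    have hcur1 : b.2 + costs.getD k 0 = pfx costs (k + 1) - pfx costs b.1 := by
      have := pfx_succ costs k hk'
      omega
    obtain ⟨left', hsh, hsle, hsK, hsbd, hsmin⟩ :=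
      shrink_spec costs maxCost hm (costs.length + 1) a.2.2 (k + 1) (by omega) (by omega)
        (by omega)
    have hstepA : stepA costs maxCost a k
        = (max a.1 ((k : Int) - (left' : Int) + 1), pfx costs (k + 1) - pfx costs left', left') := by
      simp only [stepA, hcc1, hsh]
    rw [hrange, htake, hstepA]
    by_cases hcase : maxCost < b.2 + costs.getD k 0
    · -- over budget: B slides its window one step
      have hcase' : maxCost < pfx costs (k + 1) - pfx costs b.1 := by omega
      have hlt : b.1 + 1 ≤ left' := by
        rcases Nat.lt_or_ge b.1 left' with h | h
        · omega
        · exfalso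
          have hmono := pfx_mono costs hnn h
          omega
      have hcur' : pfx costs (k + 1) - pfx costs b.1 - costs.getD b.1 0
          = pfx costs (k + 1) - pfx costs (b.1 + 1) := by
        have := pfx_succ costs b.1 (by omega)
        omega
      have hstepB : stepB costs maxCost b (costs.getD k 0)
          = (b.1 + 1, pfx costs (k + 1) - pfx costs (b.1 + 1)) := by
        simp only [stepB, hcur1, if_pos hcase', hcur']
      rw [hstepB]
      unfold LoopInv
      dsimp only
      refine ⟨hlt, hsK, rfl, rfl, hsbd, ?_, ?_⟩
      · intro l hl
        rcases Nat.lt_or_ge l a.2.2 with h | h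
        · have := h6 l h
          have := pfx_le_succ costs hnn k
          omega
        · exact hsmin l h hl
      · have hci : (b.1 : Int) + 1 ≤ (left' : Int) := by exact_mod_cast hlt
        push_cast
        omega
    · -- within budget: B keeps its window; both lefts coincide
      have hcase' : ¬ maxCost < pfx costs (k + 1) - pfx costs b.1 := by omega
      have heq1 : b.1 = a.2.2 := by
        rcases Nat.lt_or_ge b.1 a.2.2 with h | h
        · exfalso
          have := h6 b.1 h
          have := pfx_le_succ costs hnn k
          omega
        · omega
      have heq2 : left' = a.2.2 := by
        rcases Nat.lt_or_ge a.2.2 left' with h | h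
        · exfalso
          have := hsmin a.2.2 (le_refl _) h
          have hf : pfx costs b.1 = pfx costs a.2.2 := by rw [heq1]
          omega
        · omega
      have hstepB : stepB costs maxCost b (costs.getD k 0)
          = (b.1, pfx costs (k + 1) - pfx costs b.1) := by
        simp only [stepB, hcur1, if_neg hcase']
      rw [hstepB]
      unfold LoopInv
      dsimp only
      refine ⟨by omega, hsK, rfl, rfl, hsbd, ?_, ?_⟩
      · intro l hl
        rw [heq2] at hl
        have := h6 l hl
        have := pfx_le_succ costs hnn k
        omega
      · have hlb : (left' : Int) = (b.1 : Int) := by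
          exact_mod_cast congrArg (Nat.cast : Nat → Int) (heq2.trans heq1.symm)
        have hbk : (b.1 : Int) ≤ (k : Int) := by
          have : b.1 ≤ k := by omega
          exact_mod_cast this
        push_cast
        omega

-- the two ports build the same costs array on Pre_
lemma costs_eq (s t : List Char) (h : s.length ≤ t.length) :
    (List.range s.length).map (fun i => |codeAt s i - codeAt t i|)
      = (s.zip t).map (fun p => |((p.1.toNat : Int)) - ((p.2.toNat : Int))|) := by
  apply List.ext_getElem
  · simp; omega
  · intro i hi hi'
    have his : i < s.length := by simpa using hi
    have hit : i < t.length := by omega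
    simp only [List.getElem_map, List.getElem_range, List.getElem_zip]
    have h1 : codeAt s i = ((s[i].toNat : Int)) := by
      simp [codeAt, PySem.List.pyGet?_natCast, List.getElem?_eq_getElem his]
    have h2 : codeAt t i = ((t[i].toNat : Int)) := by
      simp [codeAt, PySem.List.pyGet?_natCast, List.getElem?_eq_getElem hit]
    rw [h1, h2]

-- ===== VERDICT (by name: the statement is the Claim_ definition above) =====
theorem equalSubstringOptimized_spec : Claim_equal_equalSubstringOptimized := by
  intro s t maxCost _ hpre
  obtain ⟨hlen, hmc⟩ := hpre
  unfold Spec_equalSubstringOptimized equalSubstringOptimized equalSubstringOptimized_alt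
  by_cases hz : s.toList.length = 0
  · -- empty s: both return 0
    have hnil : s.toList = [] := List.eq_nil_of_length_eq_zero hz
    simp [hnil]
  · have hm : 0 ≤ maxCost := by
      rcases hmc with h | h
      · omega
      · exact h
    simp only [if_neg hz]
    rw [costs_eq s.toList t.toList hlen]
    set n := s.toList.length with hn
    set costs := (s.toList.zip t.toList).map
      (fun p => |((p.1.toNat : Int)) - ((p.2.toNat : Int))|) with hcosts
    have hclen : costs.length = n := by
      rw [hcosts, List.length_map, List.length_zip]
      omega
    have hnn : ∀ x ∈ costs, 0 ≤ x := by
      intro x hx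
      simp only [hcosts, List.mem_map] at hx
      obtain ⟨p, _, rfl⟩ := hx
      exact abs_nonneg _
    obtain ⟨h1, h2, h3, h4, h5, h6, h7⟩ := inv_fold costs maxCost hnn hm n (by omega)
    rw [List.take_of_length_le (by omega)] at h7
    rw [h7, hclen]
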